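-- pv_equiv track=rewrite | github.com/Tomas-Wardoloff/4EnLinea | src/CuatroEnLinea.py | completarTableroEnOrden
-- ===== SOURCE A (Python) =====
-- def soltarFichaEnColumna(ficha, column, tablero):
-- 		for row in range(6, 0, -1):
-- 				if tablero[row - 1][column - 1] == 0:
-- 						tablero[row -1][column - 1] = ficha
-- 						return
--
-- def completarTableroEnOrden(secuencia, tablero):
-- 	c = 0
-- 	for column in secuencia:
-- 		if c % 2 != 0:
-- 			soltarFichaEnColumna(2, column, tablero)
-- 		else:
-- 			soltarFichaEnColumna(1, column, tablero)
-- 		c += 1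
-- 	return tablero
-- ===== SOURCE B (Python) =====
-- def completarTableroEnOrden(secuencia, tablero):
--     # Per-column cache of the lowest empty row, computed once up front and
--     # updated after each drop, instead of rescanning the column every drop.
--     if not secuencia:
--         return tablero
--     nxt = []
--     for j in range(len(tablero[0])):
--         r = 5
--         while r >= 0 and tablero[r][j] != 0:
--             r -= 1
--         nxt.append(r)
--     for i, column in enumerate(secuencia):
--         j = column - 1
--         r = nxt[j]
--         if r >= 0:
--             tablero[r][j] = 1 if i % 2 == 0 else 2
--             r -= 1
--             while r >= 0 and tablero[r][j] != 0:
--                 r -= 1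
--             nxt[j] = r
--     return tablero
-- ===== Notes on version B (the rewrite author's own statement) =====
-- stated objective: faster
-- what changed: B precomputes each column's lowest empty row in one bottom-up scan per column, then serves every drop from that cached list (resuming the scan only above a just-placed piece) instead of rescanning the column from the bottom row on every drop; Pre_ additionally requires (when there are drops) a 6-row board whose first six rows share row 0's width, because B's upfront per-column scan raises on ragged boards that A's lazy scan happens to tolerate.
import Mathlib
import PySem

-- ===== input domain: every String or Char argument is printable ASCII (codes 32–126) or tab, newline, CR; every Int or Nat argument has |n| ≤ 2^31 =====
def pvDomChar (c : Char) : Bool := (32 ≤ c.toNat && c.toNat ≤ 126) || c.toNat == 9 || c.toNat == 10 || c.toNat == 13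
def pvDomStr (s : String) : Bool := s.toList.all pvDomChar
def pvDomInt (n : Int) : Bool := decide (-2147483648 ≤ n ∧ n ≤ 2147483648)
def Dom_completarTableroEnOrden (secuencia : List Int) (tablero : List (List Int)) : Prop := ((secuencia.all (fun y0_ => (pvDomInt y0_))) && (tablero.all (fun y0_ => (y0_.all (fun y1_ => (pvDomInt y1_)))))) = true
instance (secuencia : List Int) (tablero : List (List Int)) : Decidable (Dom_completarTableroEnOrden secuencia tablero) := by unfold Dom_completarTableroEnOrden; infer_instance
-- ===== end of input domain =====

-- B precomputes each column's lowest empty row once and serves every drop from that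
-- cached list instead of A's bottom-up rescan per drop. Both A and the Python B
-- mutate `tablero` in place and return it; the equivalence proved here is about the
-- returned value.

-- ===== PORT A =====
-- the row loop of soltarFichaEnColumna; its early 'return' becomes recursion
def pvSoltarLoop (ficha column : Int) (rows : List Int) (tablero : List (List Int)) : List (List Int) :=
  match rows with
  | [] => tablero
  | row :: rest =>
    match PySem.List.pyGet? tablero (row - 1) with
    | none => tablero  -- Python raises IndexError here (excluded by Pre_)
    | some fila =>
      match PySem.List.pyGet? fila (column - 1) with
      | none => tablero  -- Python raises IndexError here (excluded by Pre_)
      | some v =>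
        if v == 0 then
          PySem.List.pySetD tablero (row - 1) (PySem.List.pySetD fila (column - 1) ficha)
        else pvSoltarLoop ficha column rest tablero

def soltarFichaEnColumna (ficha column : Int) (tablero : List (List Int)) : List (List Int) :=
  pvSoltarLoop ficha column (PySem.List.pyRange 6 0 (-1)) tablero

def completarTableroEnOrden (secuencia : List Int) (tablero : List (List Int)) : List (List Int) :=
  (secuencia.foldl (fun (st : List (List Int) × Int) column =>
      if PySem.Int.mod st.2 2 != 0 then (soltarFichaEnColumna 2 column st.1, st.2 + 1)
      else (soltarFichaEnColumna 1 column st.1, st.2 + 1)) (tablero, 0)).1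

-- ===== PORT B =====
-- Source B's 'r = 5; while r >= 0 and tablero[r][j] != 0: r -= 1', entered with r = k - 1
def pvScanLoop (tablero : List (List Int)) (j : Int) : Nat → Int
  | 0 => -1
  | k + 1 =>
    if PySem.List.pyGetD (PySem.List.pyGetD tablero (k : Int) []) j 0 != 0
    then pvScanLoop tablero j k
    else (k : Int)

def completarTableroEnOrden_alt (secuencia : List Int) (tablero : List (List Int)) : List (List Int) :=
  if secuencia.isEmpty then tablero else
  -- len(tablero[0]): IndexError on an empty board is outside Pre_, hence pyGetD
  let nxt0 := (PySem.List.pyRange 0 ((PySem.List.pyGetD tablero (0 : Int) []).length : Int) 1).foldl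
      (fun acc j => acc ++ [pvScanLoop tablero j 6]) []
  ((PySem.List.enumerate secuencia 0).foldl
    (fun (st : List (List Int) × List Int) ic =>
      let tb := st.1
      let nxt := st.2
      let j := ic.2 - 1
      let r := PySem.List.pyGetD nxt j 0   -- nxt[j]; IndexError outside Pre_
      if 0 ≤ r then
        let tb' := PySem.List.pySetD tb r
          (PySem.List.pySetD (PySem.List.pyGetD tb r []) j
            (if PySem.Int.mod ic.1 2 == 0 then 1 else 2))
        (tb', PySem.List.pySetD nxt j (pvScanLoop tb' j r.toNat))
      else (tb, nxt))
    (tablero, nxt0)).1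

-- ===== PRECONDITION & SPEC =====
-- Pre_ restricts to the game's natural domain: either no drops, or a board with at
-- least 6 rows whose first six rows share the width of row 0, every column value c
-- of the sequence mapping (via Python index c-1, possibly negative) inside that
-- width. It excludes inputs where A raises IndexError (boards shorter than 6 rows,
-- columns out of range) and also ragged boards on which A happens to return only
-- because its lazy bottom-up scan stops before touching the malformed part — there
-- B's upfront per-column scan raises instead (see cites).
def Pre_completarTableroEnOrden (secuencia : List Int) (tablero : List (List Int)) : Prop :=
  secuencia = [] ∨
    (6 ≤ tablero.length ∧
     (∀ fila ∈ tablero.take 6, fila.length = (tablero.headD []).length) ∧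
     ∀ c ∈ secuencia, 1 - ((tablero.headD []).length : Int) ≤ c ∧ c ≤ ((tablero.headD []).length : Int))
instance (secuencia : List Int) (tablero : List (List Int)) : Decidable (Pre_completarTableroEnOrden secuencia tablero) := by unfold Pre_completarTableroEnOrden; infer_instance

def pvWitness_completarTableroEnOrden : List Int × List (List Int) :=
  ([1, 2, 0, 2], [[0, 0], [0, 0], [0, 0], [0, 0], [0, 0], [0, 5]])

def Spec_completarTableroEnOrden (secuencia : List Int) (tablero : List (List Int)) (out : List (List Int)) : Prop := out = completarTableroEnOrden_alt secuencia tablero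
instance (secuencia : List Int) (tablero : List (List Int)) (out : List (List Int)) : Decidable (Spec_completarTableroEnOrden secuencia tablero out) := by unfold Spec_completarTableroEnOrden; infer_instance

-- ===== CLAIM (what is proved, stated in full; the proofs are below) =====
def Claim_equal_completarTableroEnOrden : Prop := ∀ (secuencia : List Int) (tablero : List (List Int)), Dom_completarTableroEnOrden secuencia tablero → Pre_completarTableroEnOrden secuencia tablero → Spec_completarTableroEnOrden secuencia tablero (completarTableroEnOrden secuencia tablero)

-- ===== LEMMAS AND PROOFS =====

def pvCell (t : List (List Int)) (r : Nat) (j : Int) : Int :=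
  PySem.List.pyGetD (t.getD r []) j 0
def pvSetC (t : List (List Int)) (r : Nat) (j : Int) (v : Int) : List (List Int) :=
  t.set r ((t.getD r []).set j.toNat v)
def pvRect (t : List (List Int)) (W : Nat) : Prop :=
  6 ≤ t.length ∧ ∀ r < 6, (t.getD r []).length = W

theorem pvScanLoop_eq (t : List (List Int)) (j : Int) (k : Nat) :
    pvScanLoop t j (k + 1) = if pvCell t k j ≠ 0 then pvScanLoop t j k else (k : Int) := by
  simp [pvScanLoop, pvCell, PySem.List.pyGetD_natCast]

theorem pvScanLoop_spec (t : List (List Int)) (j : Int) :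
    ∀ k : Nat,
      (pvScanLoop t j k = -1 ∧ ∀ m, m < k → pvCell t m j ≠ 0) ∨
      (∃ r : Nat, r < k ∧ pvScanLoop t j k = (r : Int) ∧ pvCell t r j = 0 ∧
        ∀ m, r < m → m < k → pvCell t m j ≠ 0) := by
  intro k
  induction k with
  | zero => left; exact ⟨rfl, by omega⟩
  | succ k ih =>
    rw [pvScanLoop_eq]
    by_cases h : pvCell t k j = 0
    · right
      exact ⟨k, by omega, by simp [h], h, by omega⟩
    · simp only [h, ne_eq, not_false_eq_true, if_pos]
      rcases ih with ⟨h1, h2⟩ | ⟨r, hr, h1, h2, h3⟩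
      · left
        refine ⟨h1, fun m hm => ?_⟩
        rcases Nat.lt_succ_iff_lt_or_eq.mp hm with hm | hm
        · exact h2 m hm
        · subst hm; exact h
      · right
        refine ⟨r, by omega, h1, h2, fun m hm1 hm2 => ?_⟩
        rcases Nat.lt_succ_iff_lt_or_eq.mp hm2 with hm | hm
        · exact h3 m hm1 hm
        · subst hm; exact h

theorem pvScanLoop_skip (t : List (List Int)) (j : Int) (k k' : Nat) (hk : k' ≤ k)
    (h : ∀ m, k' ≤ m → m < k → pvCell t m j ≠ 0) :
    pvScanLoop t j k = pvScanLoop t j k' := by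
  induction k with
  | zero =>
    have h0 : k' = 0 := by omega
    rw [h0]
  | succ k ih =>
    rcases Nat.eq_or_lt_of_le hk with hk' | hk'
    · rw [hk']
    · rw [pvScanLoop_eq, if_pos (h k (by omega) (by omega))]
      exact ih (by omega) (fun m h1 h2 => h m h1 (by omega))

theorem pvCell_setC_ne (t : List (List Int)) (r m : Nat) (j j' : Int) (v : Int)
    (hj : 0 ≤ j) (hj' : 0 ≤ j') (hltj : j.toNat < (t.getD r []).length)
    (hne : m ≠ r ∨ j' ≠ j) :
    pvCell (pvSetC t r j v) m j' = pvCell t m j' := by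
  unfold pvCell pvSetC
  by_cases hm : m = r
  · subst hm
    by_cases hr : m < t.length
    · rw [List.getD_eq_getElem?_getD, List.getElem?_set_self (by simpa using hr)]
      simp only [Option.getD_some]
      have hj'' : j' = ((j'.toNat : Nat) : Int) := by omega
      rw [hj'', ← PySem.List.pySetD_natCast (t.getD m []) j.toNat v,
          PySem.List.pyGetD_pySetD_natCast _ _ _ _ _ hltj,
          if_neg (by omega : ¬ j'.toNat = j.toNat)]
    · rw [List.set_eq_of_length_le (by omega)]
  · rw [List.getD_eq_getElem?_getD, List.getElem?_set_ne (by omega), ← List.getD_eq_getElem?_getD]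

theorem pvCell_setC_self (t : List (List Int)) (r : Nat) (j : Int) (v : Int)
    (hr : r < t.length) (hj : 0 ≤ j) (hlt : j.toNat < (t.getD r []).length) :
    pvCell (pvSetC t r j v) r j = v := by
  unfold pvCell pvSetC
  rw [List.getD_eq_getElem?_getD, List.getElem?_set_self (by simpa using hr)]
  simp only [Option.getD_some]
  have hjj : j = ((j.toNat : Nat) : Int) := by omega
  rw [hjj]
  simp only [Int.toNat_natCast]
  rw [← PySem.List.pySetD_natCast (t.getD r []) j.toNat v,
      PySem.List.pyGetD_pySetD_natCast _ _ _ _ _ hlt, if_pos rfl]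

theorem pvRect_setC (t : List (List Int)) (W r : Nat) (j : Int) (v : Int)
    (hR : pvRect t W) : pvRect (pvSetC t r j v) W := by
  obtain ⟨h1, h2⟩ := hR
  refine ⟨by simpa [pvSetC] using h1, fun m hm => ?_⟩
  by_cases hmr : m = r
  · subst hmr
    by_cases hr : m < t.length
    · rw [pvSetC, List.getD_eq_getElem?_getD, List.getElem?_set_self (by simpa using hr)]
      simp only [Option.getD_some, List.length_set]
      exact h2 m hm
    · rw [pvSetC, List.set_eq_of_length_le (by omega)]
      exact h2 m hm
  · rw [pvSetC, List.getD_eq_getElem?_getD, List.getElem?_set_ne (by omega), ← List.getD_eq_getElem?_getD]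
    exact h2 m hm

def pvJ (c : Int) (W : Nat) : Int := if c - 1 < 0 then c - 1 + W else c - 1

theorem pvJ_bounds (c : Int) (W : Nat) (hW : 0 < W) (hc1 : 1 - (W : Int) ≤ c) (hc2 : c ≤ (W : Int)) :
    0 ≤ pvJ c W ∧ pvJ c W < (W : Int) := by
  unfold pvJ; split_ifs <;> omega

theorem pvIdx_phys (W : Nat) (c : Int) (hW : 0 < W) (hc1 : 1 - (W : Int) ≤ c) (hc2 : c ≤ (W : Int)) :
    PySem.List.pyIdx? W (c - 1) = some (pvJ c W).toNat := by
  unfold PySem.List.pyIdx? pvJ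
  by_cases h : c - 1 < 0
  · rw [if_neg (by omega), if_pos (by omega), if_pos h]
    congr 1
    omega
  · rw [if_pos (by omega), if_pos (by omega), if_neg h]

theorem pvGet_phys (fila : List Int) (W : Nat) (c : Int) (hlen : fila.length = W)
    (hW : 0 < W) (hc1 : 1 - (W : Int) ≤ c) (hc2 : c ≤ (W : Int)) :
    PySem.List.pyGet? fila (c - 1) = some (PySem.List.pyGetD fila (pvJ c W) 0) := by
  have hb := pvJ_bounds c W hW hc1 hc2
  have h1 : PySem.List.pyGet? fila (c - 1) = fila[(pvJ c W).toNat]? := by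
    rw [PySem.List.pyGet?, hlen, pvIdx_phys W c hW hc1 hc2, Option.bind_some]
  rw [h1, PySem.List.pyGetD, PySem.List.pyGet?, PySem.List.pyIdx?, if_pos hb.1, if_pos (by omega)]
  rw [Option.bind_some]
  have : (pvJ c W).toNat < fila.length := by omega
  simp [List.getElem?_eq_getElem this]

theorem pvGetD_at (l : List Int) (i d : Int) (h0 : 0 ≤ i) (hlt : i.toNat < l.length) :
    PySem.List.pyGetD l i d = l.getD i.toNat d := by
  rw [PySem.List.pyGetD, PySem.List.pyGet?, PySem.List.pyIdx?, if_pos h0, if_pos (by omega),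
      Option.bind_some]
  simp [List.getD_eq_getElem?_getD, List.getElem?_eq_getElem hlt]

theorem pvGetD_phys (fila : List Int) (W : Nat) (c d : Int) (hlen : fila.length = W)
    (hW : 0 < W) (hc1 : 1 - (W : Int) ≤ c) (hc2 : c ≤ (W : Int)) :
    PySem.List.pyGetD fila (c - 1) d = PySem.List.pyGetD fila (pvJ c W) d := by
  have hb := pvJ_bounds c W hW hc1 hc2
  have hlt : (pvJ c W).toNat < fila.length := by omega
  rw [PySem.List.pyGetD, pvGet_phys fila W c hlen hW hc1 hc2, Option.getD_some,
      pvGetD_at fila (pvJ c W) 0 hb.1 hlt, pvGetD_at fila (pvJ c W) d hb.1 hlt]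
  simp [List.getD_eq_getElem?_getD, List.getElem?_eq_getElem hlt]

theorem pvSet_phys (fila : List Int) (W : Nat) (c v : Int) (hlen : fila.length = W)
    (hW : 0 < W) (hc1 : 1 - (W : Int) ≤ c) (hc2 : c ≤ (W : Int)) :
    PySem.List.pySetD fila (c - 1) v = fila.set (pvJ c W).toNat v := by
  rw [PySem.List.pySetD, PySem.List.pySet?, hlen, pvIdx_phys W c hW hc1 hc2]
  rfl

theorem pvScanLoop_j (t : List (List Int)) (W : Nat) (c : Int)
    (hR : pvRect t W) (hW : 0 < W) (hc1 : 1 - (W : Int) ≤ c) (hc2 : c ≤ (W : Int)) :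
    ∀ k : Nat, k ≤ 6 → pvScanLoop t (c - 1) k = pvScanLoop t (pvJ c W) k := by
  intro k
  induction k with
  | zero => intro _; rfl
  | succ k ih =>
    intro hk6
    rw [pvScanLoop_eq, pvScanLoop_eq, ih (by omega)]
    have : pvCell t k (c - 1) = pvCell t k (pvJ c W) := by
      unfold pvCell
      exact pvGetD_phys (t.getD k []) W c 0 (hR.2 k (by omega)) hW hc1 hc2
    rw [this]

theorem pvStepA (t : List (List Int)) (W : Nat) (c ficha : Int)
    (hR : pvRect t W) (hW : 0 < W) (hc1 : 1 - (W : Int) ≤ c) (hc2 : c ≤ (W : Int)) :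
    ∀ k : Nat, k ≤ 6 →
      pvSoltarLoop ficha c (PySem.List.pyRange (k : Int) 0 (-1)) t =
        if pvScanLoop t (pvJ c W) k < 0 then t
        else pvSetC t (pvScanLoop t (pvJ c W) k).toNat (pvJ c W) ficha := by
  intro k
  induction k with
  | zero =>
    intro _
    rw [PySem.List.pyRange_neg_one_eq_nil (by norm_num)]
    simp [pvSoltarLoop, pvScanLoop]
  | succ k ih =>
    intro hk6
    have hkl : k < t.length := by have := hR.1; omega
    rw [show ((k + 1 : Nat) : Int) = (k : Int) + 1 by push_cast; ring,
        PySem.List.pyRange_neg_one_cons (by omega)]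
    have hidx : PySem.List.pyIdx? t.length ((k : Int)) = some k := by
      unfold PySem.List.pyIdx?
      rw [if_pos (by omega), if_pos (by exact_mod_cast hkl)]
      simp
    have hrow : PySem.List.pyGet? t ((k : Int) + 1 - 1) = some (t.getD k []) := by
      rw [show ((k : Int) + 1 - 1) = (k : Int) by ring, PySem.List.pyGet?, hidx, Option.bind_some,
          List.getElem?_eq_getElem hkl, List.getD_eq_getElem?_getD, List.getElem?_eq_getElem hkl]
      rfl
    have hlen : (t.getD k []).length = W := hR.2 k (by omega)
    have hcell := pvGet_phys (t.getD k []) W c hlen hW hc1 hc2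
    rw [pvSoltarLoop, hrow, show ((k : Int) + 1 - 1) = (k : Int) by ring]
    show (match PySem.List.pyGet? (t.getD k []) (c - 1) with
      | none => t
      | some v =>
        if (v == 0) = true then
          PySem.List.pySetD t ((k : Int)) (PySem.List.pySetD (t.getD k []) (c - 1) ficha)
        else pvSoltarLoop ficha c (PySem.List.pyRange ((k : Int)) 0 (-1)) t) = _
    rw [hcell]
    show (if (PySem.List.pyGetD (t.getD k []) (pvJ c W) 0 == 0) = true then
          PySem.List.pySetD t ((k : Int)) (PySem.List.pySetD (t.getD k []) (c - 1) ficha)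
        else pvSoltarLoop ficha c (PySem.List.pyRange ((k : Int)) 0 (-1)) t) = _
    have hscan := pvScanLoop_eq t (pvJ c W) k
    by_cases hz : pvCell t k (pvJ c W) = 0
    · have hz' : PySem.List.pyGetD (t.getD k []) (pvJ c W) 0 = 0 := hz
      rw [hz']
      simp only [beq_self_eq_true, if_true]
      rw [hscan, if_neg (by simp [hz]), if_neg (by omega)]
      rw [pvSet_phys (t.getD k []) W c ficha hlen hW hc1 hc2, PySem.List.pySetD_natCast]
      unfold pvSetC
      congr 1
    · have hnz : ¬ (PySem.List.pyGetD (t.getD k []) (pvJ c W) 0 == 0) = true := by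
        simpa [pvCell] using hz
      rw [if_neg hnz]
      rw [hscan, if_pos hz]
      exact ih (by omega)

theorem pvScanLoop_congr (t t' : List (List Int)) (j : Int) :
    ∀ k : Nat, (∀ m, m < k → pvCell t m j = pvCell t' m j) → pvScanLoop t j k = pvScanLoop t' j k := by
  intro k
  induction k with
  | zero => intro _; rfl
  | succ k ih =>
    intro h
    rw [pvScanLoop_eq, pvScanLoop_eq, h k (by omega)]
    split_ifs with hc
    · exact ih (fun m hm => h m (by omega))
    · rfl

theorem pvMain (secuencia : List Int) :
    ∀ (t : List (List Int)) (nxt : List Int) (s : Int) (W : Nat),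
      pvRect t W →
      (∀ c ∈ secuencia, 1 - (W : Int) ≤ c ∧ c ≤ (W : Int)) →
      nxt.length = W →
      (∀ jn : Nat, jn < W → nxt.getD jn 0 = pvScanLoop t (jn : Int) 6) →
      (secuencia.foldl (fun (st : List (List Int) × Int) column =>
          if PySem.Int.mod st.2 2 != 0 then (soltarFichaEnColumna 2 column st.1, st.2 + 1)
          else (soltarFichaEnColumna 1 column st.1, st.2 + 1)) (t, s)).1 =
      ((PySem.List.enumerate secuencia s).foldl
        (fun (st : List (List Int) × List Int) ic =>
          let tb := st.1
          let nxt := st.2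
          let j := ic.2 - 1
          let r := PySem.List.pyGetD nxt j 0
          if 0 ≤ r then
            let tb' := PySem.List.pySetD tb r
              (PySem.List.pySetD (PySem.List.pyGetD tb r []) j
                (if PySem.Int.mod ic.1 2 == 0 then 1 else 2))
            (tb', PySem.List.pySetD nxt j (pvScanLoop tb' j r.toNat))
          else (tb, nxt))
        (t, nxt)).1 := by
  induction secuencia with
  | nil => intro t nxt s W _ _ _ _; rfl
  | cons c rest ih =>
    intro t nxt s W hR hcols hlen hval
    obtain ⟨hc1, hc2⟩ := hcols c (List.mem_cons_self)
    have hW : 0 < W := by omega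
    obtain ⟨hb0, hb1⟩ := pvJ_bounds c W hW hc1 hc2
    rw [PySem.List.enumerate_cons, List.foldl_cons, List.foldl_cons]
    have hA : (if PySem.Int.mod (t, s).2 2 != 0 then (soltarFichaEnColumna 2 c (t, s).1, (t, s).2 + 1)
            else (soltarFichaEnColumna 1 c (t, s).1, (t, s).2 + 1))
        = (soltarFichaEnColumna (PySem.Int.mod s 2 + 1) c t, s + 1) := by
      show (if PySem.Int.mod s 2 != 0 then (soltarFichaEnColumna 2 c t, s + 1)
            else (soltarFichaEnColumna 1 c t, s + 1)) = _
      rcases PySem.Int.mod_two_eq s with h | h <;> rw [h] <;> norm_num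
    rw [hA]
    have hpiece : (if PySem.Int.mod s 2 == 0 then (1 : Int) else 2) = PySem.Int.mod s 2 + 1 := by
      rcases PySem.Int.mod_two_eq s with h | h <;> rw [h] <;> norm_num
    have hr : PySem.List.pyGetD nxt (c - 1) 0 = pvScanLoop t (pvJ c W) 6 := by
      rw [pvGetD_phys nxt W c 0 hlen hW hc1 hc2]
      have hlt : (pvJ c W).toNat < nxt.length := by omega
      rw [pvGetD_at nxt (pvJ c W) 0 hb0 hlt, hval (pvJ c W).toNat (by omega),
          Int.toNat_of_nonneg hb0]
    have h6 := pvStepA t W c (PySem.Int.mod s 2 + 1) hR hW hc1 hc2 6 (by omega)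
    rw [show (((6 : Nat) : Int)) = (6 : Int) by norm_num] at h6
    have hcols' : ∀ c' ∈ rest, 1 - (W : Int) ≤ c' ∧ c' ≤ (W : Int) :=
      fun c' hc' => hcols c' (List.mem_cons_of_mem _ hc')
    by_cases hpos : 0 ≤ pvScanLoop t (pvJ c W) 6
    · rcases pvScanLoop_spec t (pvJ c W) 6 with ⟨hneg, _⟩ | ⟨rn, hrn6, hrneq, hcell0, habove⟩
      · omega
      have hrowlen : (t.getD rn []).length = W := hR.2 rn (by omega)
      have hjW : (pvJ c W).toNat < (t.getD rn []).length := by rw [hrowlen]; omega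
      have hvnz : PySem.Int.mod s 2 + 1 ≠ 0 := by
        rcases PySem.Int.mod_two_eq s with h | h <;> omega
      simp only [hr, hrneq, hpiece]
      rw [if_pos (by omega : (0:Int) ≤ (rn : Nat))]
      have htb : PySem.List.pySetD t ((rn : Nat) : Int)
            (PySem.List.pySetD (PySem.List.pyGetD t ((rn : Nat) : Int) []) (c - 1)
              (PySem.Int.mod s 2 + 1))
          = pvSetC t rn (pvJ c W) (PySem.Int.mod s 2 + 1) := by
        rw [PySem.List.pySetD_natCast, PySem.List.pyGetD_natCast,
            pvSet_phys (t.getD rn []) W c (PySem.Int.mod s 2 + 1) hrowlen hW hc1 hc2, pvSetC]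
      have hsol : soltarFichaEnColumna (PySem.Int.mod s 2 + 1) c t =
          (if pvScanLoop t (pvJ c W) 6 < 0 then t
           else pvSetC t (pvScanLoop t (pvJ c W) 6).toNat (pvJ c W) (PySem.Int.mod s 2 + 1)) := h6
      rw [htb, hsol, hrneq, if_neg (by omega)]
      simp only [Int.toNat_natCast]
      have hR' := pvRect_setC t W rn (pvJ c W) (PySem.Int.mod s 2 + 1) hR
      -- the resumed scan over the raw index equals the scan over the physical index
      have hscanj : pvScanLoop (pvSetC t rn (pvJ c W) (PySem.Int.mod s 2 + 1)) (c - 1) rn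
          = pvScanLoop (pvSetC t rn (pvJ c W) (PySem.Int.mod s 2 + 1)) (pvJ c W) rn :=
        pvScanLoop_j _ W c hR' hW hc1 hc2 rn (by omega)
      have hnxt' : PySem.List.pySetD nxt (c - 1)
            (pvScanLoop (pvSetC t rn (pvJ c W) (PySem.Int.mod s 2 + 1)) (c - 1) rn)
          = nxt.set (pvJ c W).toNat
            (pvScanLoop (pvSetC t rn (pvJ c W) (PySem.Int.mod s 2 + 1)) (pvJ c W) rn) := by
        rw [hscanj, pvSet_phys nxt W c _ hlen hW hc1 hc2]
      rw [hnxt']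
      have hresume : pvScanLoop (pvSetC t rn (pvJ c W) (PySem.Int.mod s 2 + 1)) (pvJ c W) rn
          = pvScanLoop (pvSetC t rn (pvJ c W) (PySem.Int.mod s 2 + 1)) (pvJ c W) 6 := by
        rw [pvScanLoop_skip (pvSetC t rn (pvJ c W) (PySem.Int.mod s 2 + 1)) (pvJ c W) 6 rn
          (by omega) ?_]
        intro m hm1 hm2
        rcases Nat.eq_or_lt_of_le hm1 with he | hlt
        · rw [← he,
              pvCell_setC_self t rn (pvJ c W) (PySem.Int.mod s 2 + 1)
                (by have := hR.1; omega) hb0 hjW]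
          exact hvnz
        · rw [pvCell_setC_ne t rn m (pvJ c W) (pvJ c W) (PySem.Int.mod s 2 + 1)
              hb0 hb0 hjW (Or.inl (by omega))]
          exact habove m hlt hm2
      have hval' : ∀ jn : Nat, jn < W →
          (nxt.set (pvJ c W).toNat
            (pvScanLoop (pvSetC t rn (pvJ c W) (PySem.Int.mod s 2 + 1)) (pvJ c W) rn)).getD jn 0
          = pvScanLoop (pvSetC t rn (pvJ c W) (PySem.Int.mod s 2 + 1)) (jn : Int) 6 := by
        intro jn hjn
        by_cases hjne : jn = (pvJ c W).toNat
        · subst hjne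
          rw [List.getD_eq_getElem?_getD, List.getElem?_set_self (by omega), Option.getD_some,
              hresume, show ((pvJ c W).toNat : Int) = pvJ c W from Int.toNat_of_nonneg hb0]
        · rw [List.getD_eq_getElem?_getD, List.getElem?_set_ne (by omega),
              ← List.getD_eq_getElem?_getD, hval jn hjn]
          exact pvScanLoop_congr t (pvSetC t rn (pvJ c W) (PySem.Int.mod s 2 + 1)) (jn : Int) 6
            (fun m _ =>
              (pvCell_setC_ne t rn m (pvJ c W) (jn : Int) (PySem.Int.mod s 2 + 1)
                hb0 (by omega) hjW (Or.inr (by omega))).symm)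
      exact ih (pvSetC t rn (pvJ c W) (PySem.Int.mod s 2 + 1))
        (nxt.set (pvJ c W).toNat
          (pvScanLoop (pvSetC t rn (pvJ c W) (PySem.Int.mod s 2 + 1)) (pvJ c W) rn))
        (s + 1) W hR' hcols' (by simpa using hlen) hval'
    · have hsol : soltarFichaEnColumna (PySem.Int.mod s 2 + 1) c t =
          (if pvScanLoop t (pvJ c W) 6 < 0 then t
           else pvSetC t (pvScanLoop t (pvJ c W) 6).toNat (pvJ c W) (PySem.Int.mod s 2 + 1)) := h6
      rw [hsol, if_pos (by omega)]
      simp only [hr]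
      rw [if_neg hpos]
      exact ih t nxt (s + 1) W hR hcols' hlen hval

-- ===== VERDICT (by name: the statement is the Claim_ definition above) =====
theorem completarTableroEnOrden_spec : Claim_equal_completarTableroEnOrden := by
  unfold Claim_equal_completarTableroEnOrden
  intro secuencia tablero _ hpre
  unfold Spec_completarTableroEnOrden
  rcases hpre with hnil | ⟨h6, hwid, hcols⟩
  · subst hnil; rfl
  have hhead : PySem.List.pyGetD tablero (0 : Int) [] = tablero.headD [] := by
    cases tablero with
    | nil => rfl
    | cons h tl => simp [PySem.List.pyGetD_zero_cons]
  have hR : pvRect tablero (tablero.headD []).length := by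
    refine ⟨h6, fun r hr => ?_⟩
    have hrl : r < tablero.length := by omega
    have hmem : tablero.getD r [] ∈ tablero.take 6 := by
      rw [List.getD_eq_getElem?_getD, List.getElem?_eq_getElem hrl]
      have hrt : r < (tablero.take 6).length := by
        rw [List.length_take]; omega
      have : (tablero.take 6)[r] = tablero[r] := List.getElem_take
      rw [Option.getD_some, ← this]
      exact List.getElem_mem hrt
    exact hwid _ hmem
  cases secuencia with
  | nil => rfl
  | cons c0 rest0 =>
  unfold completarTableroEnOrden completarTableroEnOrden_alt
  rw [hhead, show ((c0 :: rest0 : List Int).isEmpty) = false from rfl]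
  simp only [Bool.false_eq_true, if_false]
  set W := (tablero.headD []).length with hweq
  have hnxt0 : (PySem.List.pyRange 0 (W : Int) 1).foldl
      (fun acc j => acc ++ [pvScanLoop tablero j 6]) []
      = (PySem.List.pyRange 0 (W : Int) 1).map (fun j => pvScanLoop tablero j 6) := by
    rw [PySem.List.foldl_append_singleton_eq_map]
    simp
  have hlen0 : ((PySem.List.pyRange 0 (W : Int) 1).map (fun j => pvScanLoop tablero j 6)).length = W := by
    rw [List.length_map, PySem.List.length_pyRange_one]
    omega
  have hval0 : ∀ jn : Nat, jn < W →
      ((PySem.List.pyRange 0 (W : Int) 1).map (fun j => pvScanLoop tablero j 6)).getD jn 0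
        = pvScanLoop tablero (jn : Int) 6 := by
    intro jn hjn
    rw [List.getD_eq_getElem?_getD, List.getElem?_map, PySem.List.pyRange_one]
    rw [List.getElem?_map, List.getElem?_range (by omega)]
    simp
  rw [hnxt0]
  exact pvMain (c0 :: rest0) tablero _ 0 W hR hcols hlen0 hval0
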